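-- pv_equiv track=rewrite | github.com/inderpreetsingh01/DSA | Hashing/q07.py | func
-- ===== SOURCE A (Python) =====
-- def func(arr1, arr2):
--     pre_sum = 0
--     m = {}
--
--     res = 0
--
--     for i, vals in enumerate(zip(arr1, arr2)):
--         num = vals[0]-vals[1]
--
--         pre_sum += num
--
--         if pre_sum == 0:
--             res = i+1
--
--         if pre_sum in m:
--             res = max(res, i+1-m[pre_sum])
--
--         if pre_sum not in m:
--             m[pre_sum] = i+1
--
--     return res
-- ===== SOURCE B (Python) =====
-- def func(arr1, arr2):
--     d = [a - b for a, b in zip(arr1, arr2)]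
--     res = 0
--     while d:
--         s = 0
--         for j, x in enumerate(d):
--             s += x
--             if s == 0:
--                 res = max(res, j + 1)
--         d = d[1:]
--     return res
-- ===== Notes on version B (the rewrite author's own statement) =====
-- stated objective: alternative
-- what changed: Replaced the one-pass prefix-sum hashmap with a brute-force scan: for every start position, accumulate a running sum over the suffix and record zero-sum windows, keeping only the running sum instead of a first-occurrence table.
import Mathlib
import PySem

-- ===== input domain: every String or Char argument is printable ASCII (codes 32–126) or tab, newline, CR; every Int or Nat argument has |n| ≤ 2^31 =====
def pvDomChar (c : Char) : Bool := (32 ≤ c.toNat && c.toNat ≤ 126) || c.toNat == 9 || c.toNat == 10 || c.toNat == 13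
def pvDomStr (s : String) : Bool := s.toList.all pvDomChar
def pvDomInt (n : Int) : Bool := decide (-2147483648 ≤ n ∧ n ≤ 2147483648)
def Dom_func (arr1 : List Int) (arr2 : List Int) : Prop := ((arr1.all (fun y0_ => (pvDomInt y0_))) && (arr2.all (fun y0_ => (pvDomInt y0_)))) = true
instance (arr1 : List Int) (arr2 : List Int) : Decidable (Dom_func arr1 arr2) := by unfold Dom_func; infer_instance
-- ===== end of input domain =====

-- B replaces A's one-pass prefix-sum/first-occurrence hashmap with a brute-force scan of every
-- start position keeping only a running sum (alternative decomposition; not faster).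

-- ===== PORT A =====
-- one iteration of A's loop body; state = (pre_sum, m, res), element = (i, (a, b))
def funcStep (st : Int × PySem.Dict Int Int × Int) (p : Int × (Int × Int)) :
    Int × PySem.Dict Int Int × Int :=
  let num := p.2.1 - p.2.2
  let preSum := st.1 + num
  let res := if preSum = 0 then p.1 + 1 else st.2.2
  let res := if st.2.1.contains preSum then max res (p.1 + 1 - st.2.1.getD preSum 0) else res
  let m := if !(st.2.1.contains preSum) then st.2.1.insert preSum (p.1 + 1) else st.2.1
  (preSum, m, res)

def func (arr1 : List Int) (arr2 : List Int) : Int :=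
  ((PySem.List.enumerate (List.zip arr1 arr2)).foldl funcStep (0, PySem.Dict.empty, 0)).2.2

-- ===== PORT B =====
-- the inner `for j, x in enumerate(d)` loop; state = (s, res)
def funcInner (d : List Int) (res : Int) : Int :=
  ((PySem.List.enumerate d).foldl
    (fun (st : Int × Int) p =>
      let s := st.1 + p.2
      (s, if s = 0 then max st.2 (p.1 + 1) else st.2))
    (0, res)).2

-- the `while d:` loop; `d = d[1:]` is the tail of the (nonempty) current list
def funcLoop : List Int → Int → Int
  | [], res => res
  | x :: t, res => funcLoop t (funcInner (x :: t) res)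

def func_alt (arr1 : List Int) (arr2 : List Int) : Int :=
  funcLoop ((List.zip arr1 arr2).map (fun p => p.1 - p.2)) 0

-- ===== PRECONDITION & SPEC =====
def Spec_func (arr1 : List Int) (arr2 : List Int) (out : Int) : Prop := out = func_alt arr1 arr2
instance (arr1 : List Int) (arr2 : List Int) (out : Int) : Decidable (Spec_func arr1 arr2 out) := by unfold Spec_func; infer_instance

-- ===== CLAIM (what is proved, stated in full; the proofs are below) =====
def Claim_equal_func : Prop := ∀ (arr1 : List Int) (arr2 : List Int), Dom_func arr1 arr2 → Spec_func arr1 arr2 (func arr1 arr2)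

-- ===== LEMMAS AND PROOFS =====

-- prefix sum of the first k differences
def pref (d : List Int) (k : Nat) : Int := (d.take k).sum

theorem pref_exists (d : List Int) (j : Nat) : ∃ i, pref d i = pref d j := ⟨j, rfl⟩

-- least index i with pref d i = pref d j (exists: i = j works)
def firstAt (d : List Int) (j : Nat) : Nat := Nat.find (pref_exists d j)

-- length of the longest zero-sum window ending at j
def fA (d : List Int) (j : Nat) : Nat := j - firstAt d j

-- the common value: longest zero-sum window anywhere
def S (d : List Int) : Nat := Finset.sup (Finset.range (d.length + 1)) (fA d)

-- longest zero-sum PREFIX of d (what B's inner loop finds)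
def bp (d : List Int) : Nat :=
  Finset.sup (Finset.range (d.length + 1)) (fun j => if pref d j = 0 then j else 0)

-- what B's outer loop accumulates: best zero-sum prefix over all suffixes
def BB : List Int → Nat
  | [] => 0
  | x :: t => max (bp (x :: t)) (BB t)

-- index k ∈ [1, |d|] at which A's running prefix sum equals v
def occ (d : List Int) (v : Int) (k : Nat) : Prop := 1 ≤ k ∧ k ≤ d.length ∧ pref d k = v

-- k is the FIRST index at which the running prefix sum equals v
def locc (d : List Int) (v : Int) (k : Nat) : Prop := occ d v k ∧ ∀ i < k, ¬ occ d v i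

-- A's dict invariant: m maps each seen prefix value to its first index of occurrence (≥ 1)
def InvM (d : List Int) (m : PySem.Dict Int Int) : Prop :=
  ∀ v t, m.get? v = some t ↔ ∃ k : Nat, t = (k : Int) ∧ locc d v k

theorem pref_zero (d : List Int) : pref d 0 = 0 := rfl

theorem pref_snoc_le (d : List Int) (x : Int) {j : Nat} (hj : j ≤ d.length) :
    pref (d ++ [x]) j = pref d j := by
  unfold pref; rw [List.take_append_of_le_length hj]

theorem pref_snoc_top (d : List Int) (x : Int) :
    pref (d ++ [x]) (d.length + 1) = d.sum + x := by
  unfold pref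
  rw [List.take_of_length_le (by simp)]
  simp

theorem firstAt_le (d : List Int) (j : Nat) : firstAt d j ≤ j :=
  Nat.find_le rfl

theorem pref_firstAt (d : List Int) (j : Nat) : pref d (firstAt d j) = pref d j :=
  Nat.find_spec (pref_exists d j)

theorem firstAt_min (d : List Int) {i j : Nat} (h : pref d i = pref d j) : firstAt d j ≤ i :=
  Nat.find_le h

theorem fA_le (d : List Int) (j : Nat) : fA d j ≤ j := by
  have := firstAt_le d j; unfold fA; omega

theorem S_le_length (d : List Int) : S d ≤ d.length := by
  apply Finset.sup_le
  intro j hj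
  have := fA_le d j
  have := Finset.mem_range.mp hj
  omega

theorem firstAt_snoc (d : List Int) (x : Int) {j : Nat} (hj : j ≤ d.length) :
    firstAt (d ++ [x]) j = firstAt d j := by
  apply le_antisymm
  · exact Nat.find_le (by
      rw [pref_snoc_le d x (le_trans (firstAt_le d j) hj), pref_snoc_le d x hj]
      exact pref_firstAt d j)
  · exact Nat.find_le (by
      have h1 := pref_firstAt (d ++ [x]) j
      rwa [pref_snoc_le d x (le_trans (firstAt_le (d ++ [x]) j) hj),
        pref_snoc_le d x hj] at h1)

theorem fA_snoc (d : List Int) (x : Int) {j : Nat} (hj : j ≤ d.length) :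
    fA (d ++ [x]) j = fA d j := by
  unfold fA; rw [firstAt_snoc d x hj]

theorem sup_range_snoc (n : Nat) (f g : Nat → Nat) (h : ∀ j ≤ n, f j = g j) :
    Finset.sup (Finset.range (n + 2)) f
      = max (Finset.sup (Finset.range (n + 1)) g) (f (n + 1)) := by
  rw [Finset.range_add_one, Finset.sup_insert]
  rw [Finset.sup_congr rfl (fun j hj => h j (Nat.lt_succ_iff.mp (Finset.mem_range.mp hj)))]
  exact max_comm _ _

theorem S_snoc (d : List Int) (x : Int) :
    S (d ++ [x]) = max (S d) (fA (d ++ [x]) (d.length + 1)) := by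
  unfold S
  have hlen : (d ++ [x]).length + 1 = d.length + 2 := by simp
  rw [hlen]
  exact sup_range_snoc d.length _ _ (fun j hj => fA_snoc d x hj)

theorem bp_snoc (d : List Int) (x : Int) :
    bp (d ++ [x]) = max (bp d)
      (if pref (d ++ [x]) (d.length + 1) = 0 then d.length + 1 else 0) := by
  unfold bp
  have hlen : (d ++ [x]).length + 1 = d.length + 2 := by simp
  rw [hlen]
  exact sup_range_snoc d.length _ _ (fun j hj => by rw [pref_snoc_le d x hj])

-- ---- A side ----

theorem bp_nil : bp [] = 0 := by decide

theorem S_nil : S [] = 0 := by decide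

theorem pref_cons (x : Int) (t : List Int) (j : Nat) :
    pref (x :: t) (j + 1) = x + pref t j := by
  simp [pref]

theorem firstAt_zero_of {d : List Int} {j : Nat} (h : pref d j = 0) : firstAt d j = 0 :=
  Nat.le_zero.mp (firstAt_min d (by rw [pref_zero, h]))

theorem not_occ_of_none {d : List Int} {m : PySem.Dict Int Int} {v : Int}
    (h : InvM d m) (hm : m.get? v = none) (k : Nat) : ¬ occ d v k := by
  intro hk
  haveI : DecidablePred (occ d v) := fun k => Classical.dec _
  have he : ∃ k, occ d v k := ⟨k, hk⟩
  have hl : locc d v (Nat.find he) := ⟨Nat.find_spec he, fun i hi => Nat.find_min he hi⟩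
  have h2 := (h v ((Nat.find he : Nat) : Int)).mpr ⟨Nat.find he, rfl, hl⟩
  rw [hm] at h2
  simp at h2

theorem occ_snoc (d : List Int) (y v : Int) (k : Nat) :
    occ (d ++ [y]) v k ↔ occ d v k ∨ (k = d.length + 1 ∧ v = d.sum + y) := by
  unfold occ
  constructor
  · rintro ⟨h1, h2, h3⟩
    simp only [List.length_append, List.length_cons, List.length_nil] at h2
    by_cases hk : k ≤ d.length
    · exact Or.inl ⟨h1, hk, by rwa [pref_snoc_le d y hk] at h3⟩
    · have hk1 : k = d.length + 1 := by omega
      subst hk1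
      rw [pref_snoc_top] at h3
      exact Or.inr ⟨rfl, h3.symm⟩
  · rintro (⟨h1, h2, h3⟩ | ⟨h1, h2⟩)
    · exact ⟨h1, by simp; omega, by rwa [pref_snoc_le d y h2]⟩
    · subst h1
      exact ⟨by omega, by simp, by rw [pref_snoc_top]; exact h2.symm⟩

theorem firstAt_snoc_top_zero {d : List Int} {y : Int} (hv : d.sum + y = 0) :
    firstAt (d ++ [y]) (d.length + 1) = 0 :=
  firstAt_zero_of (by rw [pref_snoc_top]; exact hv)

theorem firstAt_snoc_top_of_locc {d : List Int} {y v : Int} {k : Nat}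
    (hv : v = d.sum + y) (hv0 : v ≠ 0) (hl : locc d v k) :
    firstAt (d ++ [y]) (d.length + 1) = k := by
  obtain ⟨⟨hk1, hk2, hk3⟩, hmin⟩ := hl
  rw [firstAt, Nat.find_eq_iff]
  constructor
  · rw [pref_snoc_le d y hk2, pref_snoc_top, hk3, hv]
  · intro i hi hpi
    rw [pref_snoc_top, ← hv] at hpi
    match i, hi with
    | 0, _ => exact hv0 (by rw [← hpi]; rfl)
    | (i + 1), hi =>
      have hile : i + 1 ≤ d.length := by omega
      rw [pref_snoc_le d y hile] at hpi
      exact hmin (i + 1) hi ⟨by omega, hile, hpi⟩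

theorem firstAt_snoc_top_of_none {d : List Int} {y v : Int}
    (hv : v = d.sum + y) (hv0 : v ≠ 0) (hno : ∀ k, ¬ occ d v k) :
    firstAt (d ++ [y]) (d.length + 1) = d.length + 1 := by
  rw [firstAt, Nat.find_eq_iff]
  refine ⟨rfl, ?_⟩
  intro i hi hpi
  rw [pref_snoc_top, ← hv] at hpi
  match i, hi with
  | 0, _ => exact hv0 (by rw [← hpi]; rfl)
  | (i + 1), hi =>
    have hile : i + 1 ≤ d.length := by omega
    rw [pref_snoc_le d y hile] at hpi
    exact hno (i + 1) ⟨by omega, hile, hpi⟩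

theorem locc_snoc_of_ne {d : List Int} {y w : Int} {k : Nat} (hw : w ≠ d.sum + y) :
    locc (d ++ [y]) w k ↔ locc d w k := by
  unfold locc
  simp only [occ_snoc, hw, and_false, or_false]

theorem locc_snoc_of_occ {d : List Int} {y v : Int} {k0 k : Nat} (hocc : occ d v k0) :
    locc (d ++ [y]) v k ↔ locc d v k := by
  constructor
  · rintro ⟨h1, h2⟩
    have hk : occ d v k := by
      rcases (occ_snoc d y v k).mp h1 with h | ⟨hk1, hk2⟩
      · exact h
      · exfalso
        exact h2 k0 (by have := hocc.2.1; omega) ((occ_snoc d y v k0).mpr (Or.inl hocc))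
    exact ⟨hk, fun i hi ho => h2 i hi ((occ_snoc d y v i).mpr (Or.inl ho))⟩
  · rintro ⟨h1, h2⟩
    refine ⟨(occ_snoc d y v k).mpr (Or.inl h1), fun i hi ho => ?_⟩
    rcases (occ_snoc d y v i).mp ho with h | ⟨hk1, hk2⟩
    · exact h2 i hi h
    · have := h1.2.1; omega

theorem locc_snoc_self {d : List Int} {y v : Int} (hv : v = d.sum + y)
    (hno : ∀ k, ¬ occ d v k) (k : Nat) :
    locc (d ++ [y]) v k ↔ k = d.length + 1 := by
  constructor
  · rintro ⟨h1, -⟩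
    rcases (occ_snoc d y v k).mp h1 with h | ⟨hk, -⟩
    · exact absurd h (hno _)
    · exact hk
  · rintro rfl
    refine ⟨(occ_snoc d y v _).mpr (Or.inr ⟨rfl, hv⟩), fun i hi ho => ?_⟩
    rcases (occ_snoc d y v i).mp ho with h | ⟨hk, -⟩
    · exact hno i h
    · omega

theorem A_inv (L : List (Int × Int)) :
    ((PySem.List.enumerate L).foldl funcStep (0, PySem.Dict.empty, 0)).1
        = (L.map (fun p => p.1 - p.2)).sum ∧
    InvM (L.map (fun p => p.1 - p.2))
        ((PySem.List.enumerate L).foldl funcStep (0, PySem.Dict.empty, 0)).2.1 ∧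
    ((PySem.List.enumerate L).foldl funcStep (0, PySem.Dict.empty, 0)).2.2
        = ((S (L.map (fun p => p.1 - p.2)) : Nat) : Int) := by
  induction L using List.reverseRecOn with
  | nil =>
    refine ⟨rfl, ?_, by simp [PySem.List.enumerate_nil, S_nil]⟩
    intro v t
    simp only [PySem.List.enumerate_nil, List.foldl_nil, PySem.Dict.get?_empty]
    constructor
    · simp
    · rintro ⟨k, -, ⟨⟨h1, h2, -⟩, -⟩⟩
      simp at h2
      omega
  | append_singleton L p ih =>
    obtain ⟨ih1, ih2, ih3⟩ := ih
    rw [PySem.List.enumerate_append, List.foldl_append, PySem.List.enumerate_cons,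
      PySem.List.enumerate_nil]
    simp only [List.foldl_cons, List.foldl_nil]
    rcases hst : (PySem.List.enumerate L).foldl funcStep (0, PySem.Dict.empty, 0)
      with ⟨ps, m, r⟩
    rw [hst] at ih1 ih2 ih3
    dsimp only at ih1 ih2 ih3
    subst ih1 ih3
    have hmap : (L ++ [p]).map (fun q => q.1 - q.2)
        = L.map (fun q => q.1 - q.2) ++ [p.1 - p.2] := by simp
    rw [hmap]
    set d := L.map (fun q => q.1 - q.2) with hd
    set y := p.1 - p.2 with hy
    have hn : d.length = L.length := by rw [hd, List.length_map]
    simp only [funcStep, zero_add]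
    set v := d.sum + y with hv
    rw [PySem.Dict.contains_eq_isSome_get?]
    have hSd := S_le_length d
    refine ⟨by rw [hv]; simp, ?_, ?_⟩
    · -- InvM (d ++ [y]) m'
      cases hm : m.get? v with
      | some t =>
        simp only [Option.isSome_some, Bool.not_true, Bool.false_eq_true, if_false]
        obtain ⟨k0, -, hl0⟩ := (ih2 v t).mp hm
        intro w u
        rw [ih2 w u]
        by_cases hw : w = v
        · subst hw
          simp only [locc_snoc_of_occ hl0.1]
        · have hw' : w ≠ d.sum + y := by rw [← hv]; exact hw
          simp only [locc_snoc_of_ne hw']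
      | none =>
        simp only [Option.isSome_none, Bool.not_false, if_true]
        have hno := not_occ_of_none ih2 hm
        intro w u
        by_cases hw : w = v
        · subst hw
          rw [PySem.Dict.get?_insert_self]
          constructor
          · intro h
            have hu : u = (L.length : Int) + 1 := by
              injection h with h'
              omega
            refine ⟨L.length + 1, by push_cast; omega,
              (locc_snoc_self hv hno _).mpr (by omega)⟩
          · rintro ⟨k, hu, hl⟩
            have hk := (locc_snoc_self hv hno k).mp hl
            congr 1
            omega
        · rw [PySem.Dict.get?_insert_of_ne _ _ hw]
          rw [ih2 w u]
          have hw' : w ≠ d.sum + y := by rw [← hv]; exact hw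
          simp only [locc_snoc_of_ne hw']
    · -- res = S (d ++ [y])
      rw [S_snoc]
      cases hm : m.get? v with
      | some t =>
        simp only [Option.isSome_some, if_true]
        rw [PySem.Dict.getD_eq_get?_getD, hm]
        obtain ⟨k, htk, hl⟩ := (ih2 v t).mp hm
        obtain ⟨hk1, hk2, -⟩ := hl.1
        by_cases hz : v = 0
        · have hfa : fA (d ++ [y]) (d.length + 1) = d.length + 1 := by
            unfold fA
            rw [firstAt_snoc_top_zero (by rw [← hv]; exact hz)]
            omega
          rw [if_pos hz, hfa]
          simp only [Option.getD_some]
          omega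
        · have hfa : fA (d ++ [y]) (d.length + 1) = d.length + 1 - k := by
            unfold fA
            rw [firstAt_snoc_top_of_locc hv hz hl]
          rw [if_neg hz, hfa]
          simp only [Option.getD_some]
          omega
      | none =>
        simp only [Option.isSome_none, Bool.false_eq_true, if_false]
        have hno := not_occ_of_none ih2 hm
        by_cases hz : v = 0
        · have hfa : fA (d ++ [y]) (d.length + 1) = d.length + 1 := by
            unfold fA
            rw [firstAt_snoc_top_zero (by rw [← hv]; exact hz)]
            omega
          rw [if_pos hz, hfa]
          omega
        · have hfa : fA (d ++ [y]) (d.length + 1) = 0 := by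
            unfold fA
            rw [firstAt_snoc_top_of_none hv hz hno]
            omega
          rw [if_neg hz, hfa]
          omega

-- ---- B side ----

theorem funcInner_fold (d : List Int) (res : Int) (hres : 0 ≤ res) :
    ((PySem.List.enumerate d).foldl
      (fun (st : Int × Int) p =>
        let s := st.1 + p.2
        (s, if s = 0 then max st.2 (p.1 + 1) else st.2))
      (0, res)) = (d.sum, max res ((bp d : Nat) : Int)) := by
  induction d using List.reverseRecOn with
  | nil =>
    simp [PySem.List.enumerate_nil, bp_nil, max_eq_left hres]
  | append_singleton d x ih =>
    rw [PySem.List.enumerate_append, List.foldl_append, ih]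
    rw [PySem.List.enumerate_cons, PySem.List.enumerate_nil]
    simp only [List.foldl_cons, List.foldl_nil]
    rw [bp_snoc, pref_snoc_top]
    by_cases hz : d.sum + x = 0
    · rw [if_pos hz, if_pos hz]
      simp only [List.sum_append, List.sum_cons, List.sum_nil, add_zero,
        Prod.mk.injEq, true_and]
      push_cast
      rw [max_assoc, zero_add]
    · rw [if_neg hz, if_neg hz]
      simp only [List.sum_append, List.sum_cons, List.sum_nil, add_zero,
        Prod.mk.injEq, true_and]
      rw [Nat.max_zero]

theorem funcInner_eq (d : List Int) (res : Int) (hres : 0 ≤ res) :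
    funcInner d res = max res ((bp d : Nat) : Int) := by
  unfold funcInner
  rw [funcInner_fold d res hres]

theorem funcLoop_eq (d : List Int) (res : Int) (hres : 0 ≤ res) :
    funcLoop d res = max res ((BB d : Nat) : Int) := by
  induction d generalizing res with
  | nil => simp [funcLoop, BB, max_eq_left hres]
  | cons x t ih =>
    rw [funcLoop, funcInner_eq (x :: t) res hres,
      ih _ (le_trans hres (le_max_left _ _))]
    show _ = max res ((BB (x :: t) : Nat) : Int)
    rw [show BB (x :: t) = max (bp (x :: t)) (BB t) from rfl]
    rw [Nat.cast_max, max_assoc]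

theorem bp_le_S (d : List Int) : bp d ≤ S d := by
  apply Finset.sup_le
  intro j hj
  split_ifs with h
  · have h0 : firstAt d j = 0 := firstAt_zero_of h
    have : fA d j = j := by unfold fA; omega
    calc j = fA d j := this.symm
      _ ≤ S d := Finset.le_sup hj
  · exact Nat.zero_le _

theorem S_cons_le (x : Int) (t : List Int) : S t ≤ S (x :: t) := by
  apply Finset.sup_le
  intro j hj
  have hf : firstAt (x :: t) (j + 1) ≤ firstAt t j + 1 := by
    apply Nat.find_le
    rw [pref_cons, pref_cons, pref_firstAt]
  have h1 : fA t j ≤ fA (x :: t) (j + 1) := by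
    have := firstAt_le t j
    unfold fA
    omega
  have h2 : fA (x :: t) (j + 1) ≤ S (x :: t) := by
    apply Finset.le_sup
    rw [Finset.mem_range] at hj ⊢
    simp only [List.length_cons]
    omega
  omega

theorem BB_le_S (d : List Int) : BB d ≤ S d := by
  induction d with
  | nil => simp [BB]
  | cons x t ih =>
    rw [show BB (x :: t) = max (bp (x :: t)) (BB t) from rfl]
    exact max_le (bp_le_S _) (le_trans ih (S_cons_le x t))

theorem pref_add (d : List Int) (i k : Nat) :
    pref d (i + k) = pref d i + pref (d.drop i) k := by
  unfold pref
  rw [List.take_add]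
  simp

theorem bp_drop_le_BB (d : List Int) (i : Nat) : bp (d.drop i) ≤ BB d := by
  induction d generalizing i with
  | nil => simp [List.drop_nil, bp_nil, BB]
  | cons x t ih =>
    cases i with
    | zero => exact le_max_left _ _
    | succ i => exact le_trans (ih i) (le_max_right _ _)

theorem S_le_BB (d : List Int) : S d ≤ BB d := by
  apply Finset.sup_le
  intro j hj
  rw [Finset.mem_range] at hj
  set i := firstAt d j with hi
  have hij : i ≤ j := firstAt_le d j
  by_cases hieq : i = j
  · have : fA d j = 0 := by unfold fA; omega
    omega
  · have hlt : i < j := by omega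
    have h0 : pref (d.drop i) (j - i) = 0 := by
      have h1 := pref_add d i (j - i)
      rw [show i + (j - i) = j by omega] at h1
      have h2 : pref d i = pref d j := pref_firstAt d j
      omega
    have h3 : j - i ≤ bp (d.drop i) := by
      have hm : j - i ∈ Finset.range ((d.drop i).length + 1) := by
        rw [Finset.mem_range, List.length_drop]
        omega
      unfold bp
      have h5 := Finset.le_sup (f := fun j => if pref (d.drop i) j = 0 then j else 0) hm
      simp only [h0, if_true] at h5
      simpa using h5
    have h4 : fA d j = j - i := rfl
    have := bp_drop_le_BB d i
    omega

theorem BB_eq_S (d : List Int) : BB d = S d :=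
  le_antisymm (BB_le_S d) (S_le_BB d)

-- ===== VERDICT (by name: the statement is the Claim_ definition above) =====
theorem func_spec : Claim_equal_func := by
  intro arr1 arr2 _
  unfold Spec_func func func_alt
  obtain ⟨-, -, hres⟩ := A_inv (List.zip arr1 arr2)
  rw [hres, funcLoop_eq _ _ le_rfl, BB_eq_S]
  have : (0 : Int) ≤ ((S ((List.zip arr1 arr2).map (fun p => p.1 - p.2)) : Nat) : Int) := by
    exact_mod_cast Nat.zero_le _
  omega
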